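-- pv_equiv track=rewrite | github.com/mlekstan/LeetCode | Algorithms/sum-of-the-elements-of-sequence.py | sum_recur
-- ===== SOURCE A (Python) =====
-- def sum_recur(A, n):
--     if n >= 1:
--         n -= 1
--         sum = sum_recur(A, n)
--         sum += A[n]
--     else:
--         sum = 0
--
--     return sum
-- ===== SOURCE B (Python) =====
-- def sum_recur(A, n):
--     total = 0
--     for i in range(n):
--         total += A[i]
--     return total
-- ===== Notes on version B (the rewrite author's own statement) =====
-- stated objective: simpler
-- what changed: Replaced the recursion on a decreasing count with a plain iterative loop accumulating A[0..n-1] into a running total.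
import Mathlib
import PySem

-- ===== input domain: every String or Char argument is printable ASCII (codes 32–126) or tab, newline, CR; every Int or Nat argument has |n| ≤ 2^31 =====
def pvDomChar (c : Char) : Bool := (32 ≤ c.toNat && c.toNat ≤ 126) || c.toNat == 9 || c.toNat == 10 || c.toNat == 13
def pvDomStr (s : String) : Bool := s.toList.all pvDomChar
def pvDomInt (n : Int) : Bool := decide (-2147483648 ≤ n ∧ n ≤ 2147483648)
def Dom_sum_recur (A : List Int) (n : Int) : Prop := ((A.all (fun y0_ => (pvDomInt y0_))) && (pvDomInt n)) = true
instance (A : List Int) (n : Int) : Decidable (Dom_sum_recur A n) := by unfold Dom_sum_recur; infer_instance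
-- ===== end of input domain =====

-- B replaces A's recursion on a decreasing count with an iterative accumulator loop over range(n); return values only.
-- ===== PORT A =====
def sum_recur (A : List Int) (n : Int) : Int :=
  if _h : n ≥ 1 then
    let n' := n - 1
    let s := sum_recur A n'
    s + (PySem.List.pyGet? A n').getD 0
  else 0
termination_by n.toNat
decreasing_by omega

-- ===== PORT B =====
def sum_recur_alt (A : List Int) (n : Int) : Int :=
  (PySem.List.pyRange 0 n 1).foldl (fun total i => total + (PySem.List.pyGet? A i).getD 0) 0

-- ===== PRECONDITION & SPEC =====
-- Pre_ excludes n > len(A), where Python A (and B) raise IndexError.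
def Pre_sum_recur (A : List Int) (n : Int) : Prop := n ≤ A.length
instance (A : List Int) (n : Int) : Decidable (Pre_sum_recur A n) := by unfold Pre_sum_recur; infer_instance
def pvWitness_sum_recur : List Int × Int := ([1, 2, 3], 2)
def Spec_sum_recur (A : List Int) (n : Int) (out : Int) : Prop := out = sum_recur_alt A n
instance (A : List Int) (n : Int) (out : Int) : Decidable (Spec_sum_recur A n out) := by unfold Spec_sum_recur; infer_instance

-- ===== CLAIM (what is proved, stated in full; the proofs are below) =====
def Claim_equal_sum_recur : Prop := ∀ (A : List Int) (n : Int), Dom_sum_recur A n → Pre_sum_recur A n → Spec_sum_recur A n (sum_recur A n)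

-- ===== LEMMAS AND PROOFS =====

-- ===== VERDICT (by name: the statement is the Claim_ definition above) =====
lemma alt_zero (A : List Int) (n : Int) (h : n ≤ 0) : sum_recur_alt A n = 0 := by
  simp [sum_recur_alt, PySem.List.pyRange_zero, Int.toNat_of_nonpos h]

lemma main (A : List Int) (k : Nat) : sum_recur A (k : Int) = sum_recur_alt A (k : Int) := by
  induction k with
  | zero => rw [sum_recur]; simp [alt_zero]
  | succ m ih =>
    have hc : ((m + 1 : Nat) : Int) = (m : Int) + 1 := by push_cast; ring
    rw [hc, sum_recur, dif_pos (show (m : Int) + 1 ≥ 1 by omega), add_sub_cancel_right]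
    show sum_recur A (m : Int) + (PySem.List.pyGet? A (m : Int)).getD 0
        = sum_recur_alt A ((m : Int) + 1)
    rw [ih, sum_recur_alt, sum_recur_alt,
      PySem.List.pyRange_one_succ_right (a := 0) (b := (m : Int)) (by omega),
      List.foldl_append]
    simp only [List.foldl_cons, List.foldl_nil]

theorem sum_recur_spec : Claim_equal_sum_recur := by
  intro A n _ _
  unfold Spec_sum_recur
  by_cases hn : n ≥ 0
  · obtain ⟨k, rfl⟩ : ∃ k : Nat, n = (k : Int) := ⟨n.toNat, by omega⟩
    exact main A k
  · rw [sum_recur, dif_neg (show ¬ n ≥ 1 by omega), alt_zero A n (by omega)]
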